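-- pv_equiv track=rewrite | github.com/923hhh/Mini-Agent-RAG | scripts/analyze_phase0_bad_cases.py | build_expected_references
-- ===== SOURCE A (Python) =====
-- from collections import Counter, defaultdict
-- from typing import Any
--
-- def build_expected_references(
--     gold_documents: list[dict[str, Any]],
--     gold_passages: list[dict[str, Any]],
-- ) -> list[dict[str, str]]:
--     passages_by_reference: dict[str, list[str]] = defaultdict(list)
--     for passage in gold_passages:
--         reference_id = str(passage.get("reference_id", "")).strip()
--         text = str(passage.get("text", "")).strip()
--         if reference_id and text:
--             passages_by_reference[reference_id].append(text)
--
--     expected: list[dict[str, str]] = []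
--     for item in gold_documents:
--         reference_id = str(item.get("reference_id", "")).strip()
--         contents = " ".join(passages_by_reference.get(reference_id, []))
--         expected.append(
--             {
--                 "source": "",
--                 "source_path": "",
--                 "title": str(item.get("title", "")).strip(),
--                 "url": str(item.get("url", "")).strip(),
--                 "reference_id": reference_id,
--                 "passage_id": "",
--                 "content": contents,
--             }
--         )
--     return expected
-- ===== SOURCE B (Python) =====
-- def build_expected_references(
--     gold_documents,
--     gold_passages,
-- ):
--     def row(item):
--         reference_id = str(item.get("reference_id", "")).strip()
--         texts = [
--             str(p.get("text", "")).strip()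
--             for p in gold_passages
--             if str(p.get("reference_id", "")).strip()
--             and str(p.get("text", "")).strip()
--             and str(p.get("reference_id", "")).strip() == reference_id
--         ]
--         return {
--             "source": "",
--             "source_path": "",
--             "title": str(item.get("title", "")).strip(),
--             "url": str(item.get("url", "")).strip(),
--             "reference_id": reference_id,
--             "passage_id": "",
--             "content": " ".join(texts),
--         }
--
--     return [row(item) for item in gold_documents]
-- ===== Notes on version B (the rewrite author's own statement) =====
-- stated objective: alternative
-- what changed: Drops the prebuilt passages_by_reference index: each document directly scans gold_passages in one comprehension collecting the texts whose stripped non-empty reference_id equals the document's, joined with ' '.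
import Mathlib
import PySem

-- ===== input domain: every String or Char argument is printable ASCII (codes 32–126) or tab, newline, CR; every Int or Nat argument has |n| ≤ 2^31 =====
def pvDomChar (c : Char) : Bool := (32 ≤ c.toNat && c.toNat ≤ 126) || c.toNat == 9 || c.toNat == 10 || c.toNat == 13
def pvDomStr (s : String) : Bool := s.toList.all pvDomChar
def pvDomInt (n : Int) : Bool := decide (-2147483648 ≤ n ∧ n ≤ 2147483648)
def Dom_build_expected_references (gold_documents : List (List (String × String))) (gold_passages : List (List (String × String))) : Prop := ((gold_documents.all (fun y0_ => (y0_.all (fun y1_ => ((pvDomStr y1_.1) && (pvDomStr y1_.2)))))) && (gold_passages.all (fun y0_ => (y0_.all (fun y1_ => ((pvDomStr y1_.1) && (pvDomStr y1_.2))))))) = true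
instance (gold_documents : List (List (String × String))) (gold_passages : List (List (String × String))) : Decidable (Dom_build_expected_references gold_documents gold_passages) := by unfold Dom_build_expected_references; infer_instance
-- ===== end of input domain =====

-- ===== PORT A =====
-- B replaces A's prebuilt passages_by_reference index by a direct scan of gold_passages
-- per document (alternative decomposition, same return value).
-- dict.get(k, ""): first match in the association list, exact via PySem.Dict.mk
def pvGetS (d : List (String × String)) (k : String) : String :=
  (PySem.Dict.mk d).getD k ""

def build_expected_references (gold_documents : List (List (String × String))) (gold_passages : List (List (String × String))) : List (List (String × String)) :=
  let passages_by_reference : PySem.Dict String (List String) :=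
    gold_passages.foldl (fun d passage =>
      let reference_id := PySem.Str.strip (pvGetS passage "reference_id")
      let text := PySem.Str.strip (pvGetS passage "text")
      if reference_id ≠ "" ∧ text ≠ "" then
        d.modify reference_id [] (· ++ [text])   -- defaultdict(list)[ref].append(text)
      else d) PySem.Dict.empty
  gold_documents.foldl (fun expected item =>
    let reference_id := PySem.Str.strip (pvGetS item "reference_id")
    let contents := PySem.Str.join " " (passages_by_reference.getD reference_id [])
    expected ++ [[("source", ""), ("source_path", ""),
      ("title", PySem.Str.strip (pvGetS item "title")),
      ("url", PySem.Str.strip (pvGetS item "url")),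
      ("reference_id", reference_id), ("passage_id", ""),
      ("content", contents)]]) []

-- ===== PORT B =====
def build_expected_references_alt (gold_documents : List (List (String × String))) (gold_passages : List (List (String × String))) : List (List (String × String)) :=
  gold_documents.map (fun item =>
    let reference_id := PySem.Str.strip (pvGetS item "reference_id")
    let texts :=
      (gold_passages.filter (fun p =>
          PySem.Str.strip (pvGetS p "reference_id") ≠ "" &&
          PySem.Str.strip (pvGetS p "text") ≠ "" &&
          PySem.Str.strip (pvGetS p "reference_id") == reference_id)).map
        (fun p => PySem.Str.strip (pvGetS p "text"))
    [("source", ""), ("source_path", ""),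
      ("title", PySem.Str.strip (pvGetS item "title")),
      ("url", PySem.Str.strip (pvGetS item "url")),
      ("reference_id", reference_id), ("passage_id", ""),
      ("content", PySem.Str.join " " texts)])

-- ===== PRECONDITION & SPEC =====
def Spec_build_expected_references (gold_documents : List (List (String × String))) (gold_passages : List (List (String × String))) (out : List (List (String × String))) : Prop := out = build_expected_references_alt gold_documents gold_passages
instance (gold_documents : List (List (String × String))) (gold_passages : List (List (String × String))) (out : List (List (String × String))) : Decidable (Spec_build_expected_references gold_documents gold_passages out) := by unfold Spec_build_expected_references; infer_instance

-- ===== CLAIM (what is proved, stated in full; the proofs are below) =====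
def Claim_equal_build_expected_references : Prop := ∀ (gold_documents : List (List (String × String))) (gold_passages : List (List (String × String))), Dom_build_expected_references gold_documents gold_passages → Spec_build_expected_references gold_documents gold_passages (build_expected_references gold_documents gold_passages)

-- ===== LEMMAS AND PROOFS =====

-- grouping invariant: looking up ref in the folded dict yields exactly the matching texts
theorem pv_fold_getD (gp : List (List (String × String))) (d : PySem.Dict String (List String)) (ref : String) :
    (gp.foldl (fun d passage =>
      let reference_id := PySem.Str.strip (pvGetS passage "reference_id")
      let text := PySem.Str.strip (pvGetS passage "text")
      if reference_id ≠ "" ∧ text ≠ "" then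
        d.modify reference_id [] (· ++ [text])
      else d) d).getD ref [] =
    d.getD ref [] ++
      ((gp.filter (fun p =>
          PySem.Str.strip (pvGetS p "reference_id") ≠ "" &&
          PySem.Str.strip (pvGetS p "text") ≠ "" &&
          PySem.Str.strip (pvGetS p "reference_id") == ref)).map
        (fun p => PySem.Str.strip (pvGetS p "text"))) := by
  induction gp generalizing d with
  | nil => simp
  | cons p rest ih =>
    simp only [List.foldl_cons, List.filter_cons]
    by_cases hg : PySem.Str.strip (pvGetS p "reference_id") ≠ "" ∧ PySem.Str.strip (pvGetS p "text") ≠ ""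
    · rw [if_pos hg, ih, PySem.Dict.getD_modify]
      by_cases he : PySem.Str.strip (pvGetS p "reference_id") = ref
      · subst he
        simp [hg.1, hg.2, List.append_assoc]
      · have he' : ref ≠ PySem.Str.strip (pvGetS p "reference_id") := Ne.symm he
        simp [he, he', hg.1, hg.2]
    · have hc : (PySem.Str.strip (pvGetS p "reference_id") ≠ "" &&
          PySem.Str.strip (pvGetS p "text") ≠ "" &&
          PySem.Str.strip (pvGetS p "reference_id") == ref) = false := by
        rw [Decidable.not_and_iff_not_or_not] at hg
        rcases hg with h | h <;> simp_all
      rw [if_neg hg, ih, hc]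
      simp

-- ===== VERDICT (by name: the statement is the Claim_ definition above) =====
theorem build_expected_references_spec : Claim_equal_build_expected_references := by
  intro gd gp _
  show _ = _
  unfold build_expected_references build_expected_references_alt
  rw [PySem.List.foldl_append_singleton_eq_map]
  refine List.map_congr_left (fun item _ => ?_)
  simp only [pv_fold_getD, PySem.Dict.getD_empty, List.nil_append]
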